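-- pv_equiv track=rewrite | github.com/ZizaCaloombo/Sensors_network | help_functions.py | indexes
-- ===== SOURCE A (Python) =====
-- def indexes(itr, element, comparison='eq'):
--     """
--     Returns list of indexes all elements of an iterable object,
--     which correspond to the comparison with the element of 'parameter'
--     :param itr - the iterable object where you want to find the indexes of 'element'
--     :param element - the element with which you want to compare
--     :param comparison - comparison operation
--
--     There is 6 provided comparison operations:
--       'eq' - equal;
--       'not_eq' - not equal;
--       'grt' - strictly greater than;
--       'lss' - strictly less than;
--       'lss_eq' - less than or equal;
--       'grt_eq' - greater than or equal.
--
--     Example: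
--
--       a = [1, 2, 10, 23, 45]
--       indexes(a, 10, 'lss') # Will return [0,1]
--     """
--     if comparison == 'eq':
--         return [i for i, elem in enumerate(itr) if element == elem]
--     elif comparison == 'not_eq':
--         return [i for i, elem in enumerate(itr) if element != elem]
--     elif comparison == 'grt':
--         return [i for i, elem in enumerate(itr) if element < elem]
--     elif comparison == 'lss':
--         return [i for i, elem in enumerate(itr) if element > elem]
--     elif comparison == 'grt_eq':
--         return [i for i, elem in enumerate(itr) if element <= elem]
--     elif comparison == 'lss_eq':
--         return [i for i, elem in enumerate(itr) if element >= elem]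
-- ===== SOURCE B (Python) =====
-- def indexes(itr, element, comparison='eq'):
--     # Three-way partition of the indexes into "below / equal / above element"
--     # buckets in one pass, then answer any comparison as a sorted merge of the
--     # relevant buckets.
--     lt, eq, gt = [], [], []
--     for i, e in enumerate(itr):
--         if e > element:
--             gt.append(i)
--         elif e == element:
--             eq.append(i)
--         else:
--             lt.append(i)
--     parts = {'eq': [eq], 'not_eq': [lt, gt], 'grt': [gt],
--              'lss': [lt], 'grt_eq': [eq, gt], 'lss_eq': [lt, eq]}
--     sel = parts.get(comparison)
--     if sel is None:
--         return None
--     res = []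
--     for part in sel:
--         res = _merge(res, part)
--     return res
--
-- def _merge(xs, ys):
--     out = []
--     i = j = 0
--     while i < len(xs) and j < len(ys):
--         if xs[i] < ys[j]:
--             out.append(xs[i]); i += 1
--         else:
--             out.append(ys[j]); j += 1
--     out.extend(xs[i:]); out.extend(ys[j:])
--     return out
-- ===== Notes on version B (the rewrite author's own statement) =====
-- stated objective: alternative
-- what changed: Instead of filtering with the chosen comparison, B partitions the indexes once into below/equal/above-element buckets and answers every comparison mode as a sorted two-pointer merge of the relevant buckets.
-- outside the precondition, e.g. on indexes([1, 2], 1, 'foo'): A returns None, B returns None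
import Mathlib
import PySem

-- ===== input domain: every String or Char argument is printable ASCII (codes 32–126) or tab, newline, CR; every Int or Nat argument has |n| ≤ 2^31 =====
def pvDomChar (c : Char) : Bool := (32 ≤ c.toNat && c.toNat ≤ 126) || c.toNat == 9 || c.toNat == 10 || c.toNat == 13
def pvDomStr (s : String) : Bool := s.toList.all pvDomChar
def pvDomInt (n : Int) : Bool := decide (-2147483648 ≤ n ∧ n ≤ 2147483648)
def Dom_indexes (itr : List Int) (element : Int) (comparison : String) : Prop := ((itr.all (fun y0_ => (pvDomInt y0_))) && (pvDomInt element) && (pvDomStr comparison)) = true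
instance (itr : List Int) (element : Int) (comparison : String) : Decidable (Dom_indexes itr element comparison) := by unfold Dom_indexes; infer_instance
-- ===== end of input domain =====

-- B replaces A's per-comparison filtering pass with one three-way partition of the
-- indexes into below/equal/above buckets and answers each comparison as a sorted
-- merge of the relevant buckets (alternative algorithm; same cost).

-- ===== PORT A =====
def indexes (itr : List Int) (element : Int) (comparison : String) : List Int :=
  if comparison = "eq" then
    ((PySem.List.enumerate itr).filter (fun p => element == p.2)).map (·.1)
  else if comparison = "not_eq" then
    ((PySem.List.enumerate itr).filter (fun p => element != p.2)).map (·.1)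
  else if comparison = "grt" then
    ((PySem.List.enumerate itr).filter (fun p => decide (element < p.2))).map (·.1)
  else if comparison = "lss" then
    ((PySem.List.enumerate itr).filter (fun p => decide (element > p.2))).map (·.1)
  else if comparison = "grt_eq" then
    ((PySem.List.enumerate itr).filter (fun p => decide (element ≤ p.2))).map (·.1)
  else if comparison = "lss_eq" then
    ((PySem.List.enumerate itr).filter (fun p => decide (element ≥ p.2))).map (·.1)
  else []  -- Python A falls through and returns None here; excluded by Pre_indexes

-- ===== PORT B =====
-- the loop of Source B: one pass, each index appended to exactly one of (lt, eq, gt)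
def pvPart3 (element : Int) : List (Int × Int) → List Int × List Int × List Int
  | [] => ([], [], [])
  | p :: rest =>
    let (lt, eqb, gt) := pvPart3 element rest
    if p.2 > element then (lt, eqb, p.1 :: gt)
    else if p.2 == element then (lt, p.1 :: eqb, gt)
    else (p.1 :: lt, eqb, gt)

-- Source B's _merge: two-pointer merge of two ascending index lists
def pvMerge : List Int → List Int → List Int
  | [], ys => ys
  | x :: xs, [] => x :: xs
  | x :: xs, y :: ys => if x < y then x :: pvMerge xs (y :: ys) else y :: pvMerge (x :: xs) ys

def indexes_alt (itr : List Int) (element : Int) (comparison : String) : List Int :=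
  let t := pvPart3 element (PySem.List.enumerate itr)
  let lt := t.1; let eqb := t.2.1; let gt := t.2.2
  let parts : PySem.Dict String (List (List Int)) :=
    PySem.Dict.mk  -- dict display with distinct literal keys, in order
      [("eq", [eqb]), ("not_eq", [lt, gt]), ("grt", [gt]),
       ("lss", [lt]), ("grt_eq", [eqb, gt]), ("lss_eq", [lt, eqb])]
  match PySem.Dict.get? parts comparison with
  | none => []  -- Python B returns None here; excluded by Pre_indexes
  | some sel => sel.foldl (fun res part => pvMerge res part) []

-- ===== PRECONDITION & SPEC =====
-- Pre_ excludes unknown comparison strings, on which A's if/elif chain falls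
-- through and returns None, which is not a list of indexes (B returns None too).
def Pre_indexes (itr : List Int) (element : Int) (comparison : String) : Prop :=
  comparison = "eq" ∨ comparison = "not_eq" ∨ comparison = "grt" ∨
  comparison = "lss" ∨ comparison = "grt_eq" ∨ comparison = "lss_eq"
instance (itr : List Int) (element : Int) (comparison : String) : Decidable (Pre_indexes itr element comparison) := by unfold Pre_indexes; infer_instance

def pvWitness_indexes : List Int × Int × String := ([1, 2, 10, 23, 45], 10, "lss")

def Spec_indexes (itr : List Int) (element : Int) (comparison : String) (out : List Int) : Prop := out = indexes_alt itr element comparison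
instance (itr : List Int) (element : Int) (comparison : String) (out : List Int) : Decidable (Spec_indexes itr element comparison out) := by unfold Spec_indexes; infer_instance

-- ===== CLAIM (what is proved, stated in full; the proofs are below) =====
def Claim_equal_indexes : Prop := ∀ (itr : List Int) (element : Int) (comparison : String), Dom_indexes itr element comparison → Pre_indexes itr element comparison → Spec_indexes itr element comparison (indexes itr element comparison)

-- ===== LEMMAS AND PROOFS =====

-- the partition is the three filters of the enumerated list
theorem pvPart3_eq (element : Int) (l : List (Int × Int)) :
    pvPart3 element l =
      ((l.filter (fun p => !decide (element < p.2) && !(p.2 == element))).map (·.1),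
       (l.filter (fun p => !decide (element < p.2) && (p.2 == element))).map (·.1),
       (l.filter (fun p => decide (element < p.2))).map (·.1)) := by
  induction l with
  | nil => simp [pvPart3]
  | cons p rest ih =>
    simp only [pvPart3, ih]
    by_cases h1 : element < p.2
    · simp [h1]
    · by_cases h2 : p.2 = element <;> simp [h1, h2]

theorem pvMerge_nil_right (xs : List Int) : pvMerge xs [] = xs := by
  cases xs <;> simp [pvMerge]

theorem pvMerge_cons_left (a : Int) (xs ys : List Int) (h : ∀ y ∈ ys, a < y) :
    pvMerge (a :: xs) ys = a :: pvMerge xs ys := by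
  cases ys with
  | nil => simp [pvMerge_nil_right]
  | cons y ys => simp [pvMerge, h y (by simp)]

theorem pvMerge_cons_right (a : Int) (xs ys : List Int) (h : ∀ x ∈ xs, a < x) :
    pvMerge xs (a :: ys) = a :: pvMerge xs ys := by
  cases xs with
  | nil => simp [pvMerge]
  | cons x xs =>
    have := h x (by simp)
    simp [pvMerge, show ¬ x < a by omega]

-- merging two disjoint filters of a key-ascending pair list is the filter of the disjunction
theorem pvMerge_filter (p q : Int × Int → Bool) (hdisj : ∀ x, ¬(p x = true ∧ q x = true))
    (l : List (Int × Int)) (hl : l.Pairwise (fun a b => a.1 < b.1)) :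
    pvMerge ((l.filter p).map (·.1)) ((l.filter q).map (·.1)) =
      (l.filter (fun x => p x || q x)).map (·.1) := by
  induction l with
  | nil => simp [pvMerge]
  | cons x rest ih =>
    rcases List.pairwise_cons.mp hl with ⟨hlt, hrest⟩
    have ih' := ih hrest
    have hmemQ : ∀ y ∈ ((rest.filter q).map (·.1)), x.1 < y := by
      intro y hy
      rcases List.mem_map.mp hy with ⟨b, hb, rfl⟩
      exact hlt b (List.mem_of_mem_filter hb)
    have hmemP : ∀ y ∈ ((rest.filter p).map (·.1)), x.1 < y := by
      intro y hy
      rcases List.mem_map.mp hy with ⟨b, hb, rfl⟩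
      exact hlt b (List.mem_of_mem_filter hb)
    by_cases hp : p x = true
    · have hq : q x = false := by
        cases h : q x
        · rfl
        · exact absurd ⟨hp, h⟩ (hdisj x)
      simp only [List.filter_cons, hp, hq, Bool.or_eq_true, true_or, decide_true,
        if_true, Bool.false_eq_true, if_false, List.map_cons]
      rw [pvMerge_cons_left _ _ _ hmemQ, ih']
    · have hp' : p x = false := by cases h : p x; rfl; exact absurd h hp
      by_cases hq : q x = true
      · simp only [List.filter_cons, hp', hq, Bool.or_eq_true, or_true, decide_true,
          if_true, Bool.false_eq_true, if_false, List.map_cons]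
        rw [pvMerge_cons_right _ _ _ hmemP, ih']
      · have hq' : q x = false := by cases h : q x; rfl; exact absurd h hq
        simp only [List.filter_cons, hp', hq', Bool.false_eq_true, if_false,
          Bool.or_eq_true, or_self, Bool.or_self]
        exact ih'

-- ===== VERDICT (by name: the statement is the Claim_ definition above) =====
theorem indexes_spec : Claim_equal_indexes := by
  intro itr element comparison _ hpre
  unfold Spec_indexes indexes indexes_alt
  have hpw : (PySem.List.enumerate itr).Pairwise (fun a b => a.1 < b.1) :=
    PySem.List.pairwise_lt_enumerate itr 0
  have hm := fun p q h => pvMerge_filter p q h (PySem.List.enumerate itr) hpw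
  rcases hpre with h | h | h | h | h | h <;> subst h <;>
    simp only [PySem.Dict.get?_mk_cons, String.reduceBEq, beq_self_eq_true, cond_true,
      cond_false, Bool.false_eq_true, Bool.true_eq_false, if_true, if_false,
      String.reduceEq, reduceIte, List.foldl, pvPart3_eq, pvMerge] <;>
    (try rw [hm _ _ (by intro x ⟨h1, h2⟩; simp at h1 h2; omega)]) <;>
    (apply congrArg
     apply List.filter_congr
     intro x _
     cases h1 : decide (element < x.2) <;> cases h2 : (x.2 == element) <;>
       simp_all <;> omega)
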